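-- pv_equiv track=rewrite | github.com/thregit/nesrd3q | bifid_decrypt_v2.py | create_polybius_square_3x3
-- ===== SOURCE A (Python) =====
-- def create_polybius_square_3x3(keyword):
--     """
--     Create a 3x3 Polybius square for alphabet a-i.
--     """
--     alphabet = 'abcdefghi'
--     square = []
--     seen = set()
--
--     for char in keyword.lower():
--         if char in alphabet and char not in seen:
--             square.append(char)
--             seen.add(char)
--
--     for char in alphabet:
--         if char not in seen:
--             square.append(char)
--             seen.add(char)
--
--     return ''.join(square)
-- ===== SOURCE B (Python) =====
-- def create_polybius_square_3x3(keyword):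
--     """
--     Create a 3x3 Polybius square for alphabet a-i.
--     """
--     alphabet = 'abcdefghi'
--     kw = keyword.lower()
--
--     def first_use(c):
--         i = kw.find(c)
--         return i if i >= 0 else len(kw) + alphabet.find(c)
--
--     return ''.join(sorted(alphabet, key=first_use))
-- ===== Notes on version B (the rewrite author's own statement) =====
-- stated objective: alternative
-- what changed: Instead of streaming dedup passes with a seen-set, B sorts the 9 alphabet letters by a computed rank (first occurrence index in keyword.lower() via str.find, or len(kw)+alphabet position for absent letters).
import Mathlib
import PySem

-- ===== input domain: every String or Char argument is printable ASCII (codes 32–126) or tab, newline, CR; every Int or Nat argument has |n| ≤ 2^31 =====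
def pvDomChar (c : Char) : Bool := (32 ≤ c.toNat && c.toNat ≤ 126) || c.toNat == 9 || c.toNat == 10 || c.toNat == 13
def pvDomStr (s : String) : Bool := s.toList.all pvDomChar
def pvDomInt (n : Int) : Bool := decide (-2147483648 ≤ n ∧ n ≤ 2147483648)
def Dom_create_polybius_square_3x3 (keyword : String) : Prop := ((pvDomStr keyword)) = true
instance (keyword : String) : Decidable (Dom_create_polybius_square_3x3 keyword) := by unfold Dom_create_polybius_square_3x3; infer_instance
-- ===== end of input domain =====

-- B replaces A's two dedup passes over a seen-set by sorting the 9 alphabet letters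
-- by a computed rank (first index in keyword.lower(), else len(kw)+alphabet position);
-- objective: alternative algorithm, same cost.

-- ===== PORT A =====
-- two loops, each appending to `square` and maintaining the set `seen`, as in A
def create_polybius_square_3x3 (keyword : String) : String :=
  let alphabet : List Char := "abcdefghi".toList
  -- `char in alphabet` on a 1-char string is membership of that char
  let st1 := ((PySem.Str.lower keyword).toList).foldl
    (fun (st : List Char × PySem.Set Char) c =>
      if alphabet.contains c && !(PySem.Set.contains st.2 c) then
        (st.1 ++ [c], PySem.Set.add st.2 c)
      else st) ([], PySem.Set.empty)
  let st2 := alphabet.foldl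
    (fun (st : List Char × PySem.Set Char) c =>
      if !(PySem.Set.contains st.2 c) then
        (st.1 ++ [c], PySem.Set.add st.2 c)
      else st) st1
  String.ofList st2.1

-- ===== PORT B =====
-- sorted(alphabet, key=first_use); kw.find / alphabet.find are PySem.Str.find
def create_polybius_square_3x3_alt (keyword : String) : String :=
  let alphabet : List Char := "abcdefghi".toList
  let kw := PySem.Str.lower keyword
  let first_use : Char → Int := fun c =>
    let i := PySem.Str.find kw (String.ofList [c])
    if i ≥ 0 then i else PySem.Str.len kw + PySem.Str.find "abcdefghi" (String.ofList [c])
  String.ofList (PySem.List.sorted alphabet first_use)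

-- ===== PRECONDITION & SPEC =====
def Spec_create_polybius_square_3x3 (keyword : String) (out : String) : Prop := out = create_polybius_square_3x3_alt keyword
instance (keyword : String) (out : String) : Decidable (Spec_create_polybius_square_3x3 keyword out) := by unfold Spec_create_polybius_square_3x3; infer_instance

-- ===== CLAIM (what is proved, stated in full; the proofs are below) =====
def Claim_equal_create_polybius_square_3x3 : Prop := ∀ (keyword : String), Dom_create_polybius_square_3x3 keyword → Spec_create_polybius_square_3x3 keyword (create_polybius_square_3x3 keyword)

-- ===== LEMMAS AND PROOFS =====

-- reference fold: accumulate the chars of xs that are in "abcdefghi" and not yet in the accumulator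
def pvPo (sq : List Char) (xs : List Char) : List Char :=
  xs.foldl (fun sq c =>
    if "abcdefghi".toList.contains c && !(PySem.Set.contains sq c) then sq ++ [c] else sq) sq

-- the same accumulation written as structural recursion over the scanned list
def pvDf (seen : List Char) : List Char → List Char
  | [] => []
  | x :: xs =>
    if "abcdefghi".toList.contains x && !(PySem.Set.contains seen x) then
      x :: pvDf (seen ++ [x]) xs
    else pvDf seen xs

theorem pvNotMem_of_contains_false {sq : List Char} {c : Char}
    (h : PySem.Set.contains sq c = false) : c ∉ sq := by
  intro hm
  rw [(PySem.Set.contains_iff sq c).mpr hm] at h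
  exact Bool.noConfusion h

-- A's first loop, on a diagonal state (square = seen), computes pvPo
theorem pvLoop1_eq (xs : List Char) (sq : List Char) :
    xs.foldl (fun (st : List Char × PySem.Set Char) c =>
      if "abcdefghi".toList.contains c && !(PySem.Set.contains st.2 c) then
        (st.1 ++ [c], PySem.Set.add st.2 c)
      else st) (sq, sq) = (pvPo sq xs, pvPo sq xs) := by
  induction xs generalizing sq with
  | nil => rfl
  | cons c xs ih =>
    rw [List.foldl_cons,
        show pvPo sq (c :: xs) =
          pvPo (if "abcdefghi".toList.contains c && !(PySem.Set.contains sq c) then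
            sq ++ [c] else sq) xs from rfl]
    by_cases h : ("abcdefghi".toList.contains c && !(PySem.Set.contains sq c)) = true
    · have hnm : c ∉ sq := pvNotMem_of_contains_false (by
        rcases Bool.and_eq_true .. |>.mp h with ⟨-, h2⟩
        simpa using h2)
      rw [if_pos h, if_pos h, PySem.Set.add_of_not_mem hnm]
      exact ih (sq ++ [c])
    · rw [if_neg h, if_neg h]
      exact ih sq

-- A's second loop (no alphabet test), on chars that are all in the alphabet, also computes pvPo
theorem pvLoop2_eq (xs : List Char) (sq : List Char)
    (hxs : ∀ c ∈ xs, "abcdefghi".toList.contains c = true) :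
    xs.foldl (fun (st : List Char × PySem.Set Char) c =>
      if !(PySem.Set.contains st.2 c) then
        (st.1 ++ [c], PySem.Set.add st.2 c)
      else st) (sq, sq) = (pvPo sq xs, pvPo sq xs) := by
  induction xs generalizing sq with
  | nil => rfl
  | cons c xs ih =>
    have hc : "abcdefghi".toList.contains c = true := hxs c (List.mem_cons_self ..)
    have htail : ∀ d ∈ xs, "abcdefghi".toList.contains d = true :=
      fun d hd => hxs d (List.mem_cons_of_mem _ hd)
    rw [List.foldl_cons,
        show pvPo sq (c :: xs) =
          pvPo (if "abcdefghi".toList.contains c && !(PySem.Set.contains sq c) then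
            sq ++ [c] else sq) xs from rfl, hc, Bool.true_and]
    by_cases h : (!(PySem.Set.contains sq c)) = true
    · have hnm : c ∉ sq := pvNotMem_of_contains_false (by simpa using h)
      rw [if_pos h, if_pos h, PySem.Set.add_of_not_mem hnm]
      exact ih (sq ++ [c]) htail
    · rw [if_neg h, if_neg h]
      exact ih sq htail

-- pvPo over an append splits into two folds
theorem pvPo_append (xs ys sq : List Char) : pvPo sq (xs ++ ys) = pvPo (pvPo sq xs) ys := by
  simp [pvPo, List.foldl_append]

-- the fold is the structural recursion appended to the accumulator
theorem pvPo_eq_df (xs : List Char) : ∀ seen, pvPo seen xs = seen ++ pvDf seen xs := by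
  induction xs with
  | nil => intro seen; simp [pvPo, pvDf]
  | cons x xs ih =>
    intro seen
    rw [show pvPo seen (x :: xs) =
      pvPo (if "abcdefghi".toList.contains x && !(PySem.Set.contains seen x) then
        seen ++ [x] else seen) xs from rfl, pvDf]
    by_cases h : ("abcdefghi".toList.contains x && !(PySem.Set.contains seen x)) = true
    · rw [if_pos h, if_pos h, ih (seen ++ [x])]
      simp
    · rw [if_neg h, if_neg h, ih seen]

-- membership in pvDf
theorem pvMem_df (xs : List Char) : ∀ seen c,
    c ∈ pvDf seen xs ↔ c ∈ "abcdefghi".toList ∧ c ∉ seen ∧ c ∈ xs := by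
  induction xs with
  | nil => intro seen c; simp [pvDf]
  | cons x xs ih =>
    intro seen c
    rw [pvDf]
    by_cases h : ("abcdefghi".toList.contains x && !(PySem.Set.contains seen x)) = true
    · rcases Bool.and_eq_true .. |>.mp h with ⟨h1, h2⟩
      have hxA : x ∈ "abcdefghi".toList := by simpa using h1
      have hxs : x ∉ seen := pvNotMem_of_contains_false (by simpa using h2)
      rw [if_pos h]
      simp only [List.mem_cons, ih (seen ++ [x]) c, List.mem_append]
      constructor
      · rintro (rfl | ⟨hA, hns, hx⟩)
        · exact ⟨hxA, hxs, Or.inl rfl⟩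
        · exact ⟨hA, fun hc => hns (Or.inl hc), Or.inr hx⟩
      · rintro ⟨hA, hns, (rfl | hx)⟩
        · exact Or.inl rfl
        · by_cases hcx : c = x
          · exact Or.inl hcx
          · refine Or.inr ⟨hA, ?_, hx⟩
            intro hc
            rcases hc with h' | h' | h'
            · exact hns h'
            · exact hcx h'
            · simp at h'
    · rw [if_neg h]
      have hx : x ∈ "abcdefghi".toList → x ∈ seen := by
        intro hA
        by_contra hns
        have hxf : PySem.Set.contains seen x = false := by
          cases hcc : PySem.Set.contains seen x with
          | false => rfl
          | true => exact absurd ((PySem.Set.contains_iff seen x).mp hcc) hns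
        exact h (by simp only [Bool.and_eq_true, Bool.not_eq_true']
                    exact ⟨by simpa using hA, hxf⟩)
      rw [ih seen c]
      simp only [List.mem_cons]
      constructor
      · rintro ⟨hA, hns, hxx⟩; exact ⟨hA, hns, Or.inr hxx⟩
      · rintro ⟨hA, hns, (rfl | hxx)⟩
        · exact absurd (hx hA) hns
        · exact ⟨hA, hns, hxx⟩

-- pvDf is duplicate-free
theorem pvNodup_df (xs : List Char) : ∀ seen, (pvDf seen xs).Nodup := by
  induction xs with
  | nil => intro seen; simp [pvDf]
  | cons x xs ih =>
    intro seen
    rw [pvDf]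
    by_cases h : ("abcdefghi".toList.contains x && !(PySem.Set.contains seen x)) = true
    · rw [if_pos h]
      refine List.nodup_cons.mpr ⟨?_, ih (seen ++ [x])⟩
      intro hx
      rcases (pvMem_df xs (seen ++ [x]) x).mp hx with ⟨-, hns, -⟩
      exact hns (by simp)
    · rw [if_neg h]; exact ih seen

-- pvDf lists elements in order of their index in the scanned list
theorem pvPairwise_df (xs : List Char) : ∀ seen,
    (pvDf seen xs).Pairwise (fun a b => xs.idxOf a < xs.idxOf b) := by
  induction xs with
  | nil => intro seen; simp [pvDf]
  | cons x xs ih =>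
    intro seen
    have hshift : ∀ (l : List Char), l.Pairwise (fun a b => xs.idxOf a < xs.idxOf b) →
        (∀ c ∈ l, c ≠ x) → l.Pairwise (fun a b => (x :: xs).idxOf a < (x :: xs).idxOf b) := by
      intro l hp hne
      refine List.Pairwise.imp_of_mem ?_ hp
      intro a b ha hb hab
      rw [List.idxOf_cons_ne _ (Ne.symm (hne a ha)), List.idxOf_cons_ne _ (Ne.symm (hne b hb))]
      omega
    rw [pvDf]
    by_cases h : ("abcdefghi".toList.contains x && !(PySem.Set.contains seen x)) = true
    · rw [if_pos h]
      refine List.pairwise_cons.mpr ⟨?_, ?_⟩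
      · intro b hb
        rcases (pvMem_df xs (seen ++ [x]) b).mp hb with ⟨-, hns, -⟩
        have hbx : b ≠ x := fun hbx => hns (by simp [hbx])
        rw [List.idxOf_cons_self, List.idxOf_cons_ne _ (Ne.symm hbx)]
        omega
      · exact hshift _ (ih (seen ++ [x])) (fun c hc => by
          rcases (pvMem_df xs (seen ++ [x]) c).mp hc with ⟨-, hns, -⟩
          exact fun hcx => hns (by simp [hcx]))
    · rw [if_neg h]
      refine hshift _ (ih seen) ?_
      intro c hc hcx
      rcases (pvMem_df xs seen c).mp hc with ⟨hA, hns, -⟩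
      subst hcx
      simp only [Bool.and_eq_true, Bool.not_eq_true'] at h
      rcases Decidable.not_and_iff_not_or_not.mp h with h1 | h2
      · exact h1 (by simpa using hA)
      · exact hns ((PySem.Set.contains_iff seen c).mp ((Bool.not_eq_false _).mp h2))

-- find of a singleton is the first index of that char (or -1)
theorem pvFind_singleton_of_not_mem {s : List Char} {c : Char} (h : c ∉ s) :
    PySem.Chars.find s [c] = -1 := by
  rw [PySem.Chars.find_eq_neg_one_iff]
  intro hinf
  exact h (hinf.subset (List.mem_singleton_self c))

theorem pvIdxOf_min (s : List Char) (c : Char) : ∀ i < s.idxOf c, s[i]? ≠ some c := by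
  induction s with
  | nil => intro i hi; simp at hi ⊢
  | cons x s ih =>
    intro i hi
    by_cases hcx : x = c
    · subst hcx; rw [List.idxOf_cons_self] at hi; omega
    · rw [List.idxOf_cons_ne _ hcx] at hi
      cases i with
      | zero => simpa using fun h => hcx h
      | succ i =>
        simpa using ih i (by omega)

theorem pvFind_singleton_of_mem {s : List Char} {c : Char} (h : c ∈ s) :
    PySem.Chars.find s [c] = (s.idxOf c : Int) := by
  have hinf : [c] <:+: s := by
    rcases List.append_of_mem h with ⟨l, r, rfl⟩
    exact ⟨l, r, by simp⟩
  have hne : PySem.Chars.find s [c] ≠ -1 := (PySem.Chars.find_ne_neg_one_iff s [c]).mpr hinf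
  have hge : (0 : Int) ≤ PySem.Chars.find s [c] := by
    have := PySem.Chars.neg_one_le_find s [c]
    omega
  rcases PySem.Chars.find_spec hge with ⟨hp, hmin⟩
  set n := (PySem.Chars.find s [c]).toNat with hn
  have hhit : s[n]? = some c := by
    rcases hp with ⟨t, ht⟩
    rw [← List.head?_drop, ← ht]
    rfl
  have hk : s.idxOf c < s.length := List.idxOf_lt_length_iff.mpr h
  have hkhit : s[s.idxOf c]? = some c := by
    rw [List.getElem?_eq_getElem hk, List.getElem_idxOf hk]
  -- n ≤ idxOf: otherwise idxOf < n and s.drop (idxOf) has prefix [c]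
  have h1 : n ≤ s.idxOf c := by
    by_contra hlt
    exact hmin (s.idxOf c) (by omega) (by
      refine ⟨List.drop (s.idxOf c + 1) s, ?_⟩
      have := List.getElem?_eq_some_iff.mp hkhit
      rcases this with ⟨hh, hg⟩
      rw [List.drop_eq_getElem_cons hh, hg]
      simp)
  have h2 : s.idxOf c ≤ n := by
    by_contra hlt
    exact pvIdxOf_min s c n (by omega) hhit
  have : n = s.idxOf c := by omega
  rw [← Int.toNat_of_nonneg hge, ← hn, this]

-- idxOf over an append
theorem pvIdxOf_append_left {c : Char} (l r : List Char) (h : c ∈ l) :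
    (l ++ r).idxOf c = l.idxOf c := by
  induction l with
  | nil => simp at h
  | cons x l ih =>
    by_cases hcx : x = c
    · subst hcx; simp [List.idxOf_cons_self]
    · rw [List.cons_append, List.idxOf_cons_ne _ hcx, List.idxOf_cons_ne _ hcx,
        ih (by rcases List.mem_cons.mp h with h' | h'; exact absurd h'.symm hcx; exact h')]

theorem pvIdxOf_append_right {c : Char} (l r : List Char) (h : c ∉ l) :
    (l ++ r).idxOf c = l.length + r.idxOf c := by
  induction l with
  | nil => simp
  | cons x l ih =>
    have hcx : x ≠ c := fun hx => h (by simp [hx])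
    rw [List.cons_append, List.idxOf_cons_ne _ hcx, ih (fun hc => h (List.mem_cons_of_mem _ hc))]
    simp [Nat.succ_add]

-- B's rank equals the index in the scanned list ks ++ alphabet, for alphabet letters
theorem pvKey_eq_idxOf (ks : List Char) (c : Char) (hA : c ∈ "abcdefghi".toList) :
    (if PySem.Chars.find ks [c] ≥ 0 then PySem.Chars.find ks [c]
     else (ks.length : Int) + PySem.Chars.find "abcdefghi".toList [c]) =
    ((ks ++ "abcdefghi".toList).idxOf c : Int) := by
  by_cases hm : c ∈ ks
  · rw [pvFind_singleton_of_mem hm, if_pos (by exact_mod_cast Nat.zero_le _),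
      pvIdxOf_append_left _ _ hm]
  · rw [pvFind_singleton_of_not_mem hm, if_neg (by omega),
      pvFind_singleton_of_mem hA, pvIdxOf_append_right _ _ hm]
    push_cast
    ring

-- ===== VERDICT (by name: the statement is the Claim_ definition above) =====
set_option maxHeartbeats 1000000 in
theorem create_polybius_square_3x3_spec : Claim_equal_create_polybius_square_3x3 := by
  intro keyword _
  unfold Spec_create_polybius_square_3x3 create_polybius_square_3x3 create_polybius_square_3x3_alt
  dsimp only
  rw [show (PySem.Set.empty : PySem.Set Char) = ([] : List Char) from rfl]
  rw [pvLoop1_eq, pvLoop2_eq _ _ (fun c hc => by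
        rw [List.contains_eq_mem]; exact decide_eq_true hc)]
  set ks := (PySem.Str.lower keyword).toList with hks
  set A9 := "abcdefghi".toList with hA9
  have hL : pvPo ([] : List Char) (ks ++ A9) = pvDf [] (ks ++ A9) := by
    rw [pvPo_eq_df]; simp
  rw [← pvPo_append, hL]
  -- B's sort returns exactly the df list
  refine congrArg String.ofList (Eq.symm (PySem.List.sorted_eq_of_perm_of_pairwise_lt _ _ _ ?_ ?_))
  · refine (List.perm_ext_iff_of_nodup (pvNodup_df _ _) (by rw [hA9]; decide)).mpr ?_
    intro c
    rw [pvMem_df]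
    constructor
    · rintro ⟨hA, -, -⟩; exact hA
    · intro hA
      exact ⟨hA, by simp, List.mem_append.mpr (Or.inr hA)⟩
  · have hp := pvPairwise_df (ks ++ A9) []
    refine List.Pairwise.imp_of_mem ?_ hp
    intro a b ha hb hlt
    rcases (pvMem_df _ _ a).mp ha with ⟨haA, -, -⟩
    rcases (pvMem_df _ _ b).mp hb with ⟨hbA, -, -⟩
    have hkwa : PySem.Str.find (PySem.Str.lower keyword) (String.ofList [a]) =
        PySem.Chars.find ks [a] := by rw [PySem.Str.find_eq, hks]; exact congrArg _ String.toList_ofList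
    have hkwb : PySem.Str.find (PySem.Str.lower keyword) (String.ofList [b]) =
        PySem.Chars.find ks [b] := by rw [PySem.Str.find_eq, hks]; exact congrArg _ String.toList_ofList
    have hfa : PySem.Str.find "abcdefghi" (String.ofList [a]) = PySem.Chars.find A9 [a] := by
      rw [PySem.Str.find_eq, hA9]; exact congrArg _ String.toList_ofList
    have hfb : PySem.Str.find "abcdefghi" (String.ofList [b]) = PySem.Chars.find A9 [b] := by
      rw [PySem.Str.find_eq, hA9]; exact congrArg _ String.toList_ofList
    rw [hkwa, hkwb, hfa, hfb, PySem.Str.len_eq, ← hks]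
    rw [pvKey_eq_idxOf ks a haA, pvKey_eq_idxOf ks b hbA]
    exact_mod_cast hlt
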